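-- pv_equiv track=rewrite | github.com/egulsen/Recursion-and-Computational-Complexity | Recursion.py | checkLists
-- ===== SOURCE A (Python) =====
-- def checkLists(int1,int2):
--     #base case : if both lists empty, return True
--     if len(int1) == 0 and len(int2) == 0:
--         return True
--     elif len(int1) != len(int2):
--         return False
--     elif int1[0] != int2[0]:
--         return False
--     else:
--          return checkLists(int1[1:],int2[1:])
-- ===== SOURCE B (Python) =====
-- def checkLists(int1, int2):
--     if len(int1) != len(int2):
--         return False
--     for a, b in zip(int1, int2):
--         if a != b:
--             return False
--     return True
-- ===== Notes on version B (the rewrite author's own statement) =====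
-- stated objective: faster
-- what changed: Replaced the tail recursion with repeated list slicing by a single up-front length check followed by an iterative scan over zipped element pairs.
import Mathlib
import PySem

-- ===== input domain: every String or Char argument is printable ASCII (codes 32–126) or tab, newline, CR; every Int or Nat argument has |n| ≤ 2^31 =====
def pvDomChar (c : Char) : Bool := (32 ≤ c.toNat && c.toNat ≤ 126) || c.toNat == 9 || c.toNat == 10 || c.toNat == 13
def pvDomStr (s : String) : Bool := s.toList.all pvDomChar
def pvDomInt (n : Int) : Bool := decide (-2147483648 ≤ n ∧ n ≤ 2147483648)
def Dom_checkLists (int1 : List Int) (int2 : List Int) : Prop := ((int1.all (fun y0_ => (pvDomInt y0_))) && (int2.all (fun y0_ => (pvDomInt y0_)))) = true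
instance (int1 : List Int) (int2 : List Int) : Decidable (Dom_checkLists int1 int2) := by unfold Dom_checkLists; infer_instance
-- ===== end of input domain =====

-- B replaces A's slicing recursion by one length check and an iterative scan over zipped pairs (simpler).
-- ===== PORT A =====
def checkLists : List Int → List Int → Bool
  | int1, int2 =>
    if int1.length == 0 && int2.length == 0 then true
    else if int1.length != int2.length then false
    else match int1, int2 with
      | a :: t1, b :: t2 => if a != b then false else checkLists t1 t2
      | _, _ => false    -- unreachable: lists nonempty here

-- ===== PORT B =====
-- B: up-front length check, then scan the zipped pairs
def checkLists_alt (int1 : List Int) (int2 : List Int) : Bool :=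
  if int1.length != int2.length then false
  else (int1.zip int2).all (fun p => p.1 == p.2)

-- ===== PRECONDITION & SPEC =====
def Spec_checkLists (int1 : List Int) (int2 : List Int) (out : Bool) : Prop := out = checkLists_alt int1 int2
instance (int1 : List Int) (int2 : List Int) (out : Bool) : Decidable (Spec_checkLists int1 int2 out) := by unfold Spec_checkLists; infer_instance

-- ===== CLAIM (what is proved, stated in full; the proofs are below) =====
def Claim_equal_checkLists : Prop := ∀ (int1 : List Int) (int2 : List Int), Dom_checkLists int1 int2 → Spec_checkLists int1 int2 (checkLists int1 int2)

-- ===== LEMMAS AND PROOFS =====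

lemma checkLists_eq : ∀ (int1 int2 : List Int), checkLists int1 int2 = checkLists_alt int1 int2 := by
  intro int1
  induction int1 with
  | nil =>
    intro int2
    cases int2 <;> simp [checkLists, checkLists_alt]
  | cons a t1 ih =>
    intro int2
    cases int2 with
    | nil => simp [checkLists, checkLists_alt]
    | cons b t2 =>
      rw [checkLists]
      simp only [checkLists_alt]
      by_cases hl : t1.length = t2.length
      · by_cases hab : a = b
        · subst hab
          simp [hl, ih t2, checkLists_alt]
        · simp [hl, hab]
      · simp [hl]

-- ===== VERDICT (by name: the statement is the Claim_ definition above) =====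
theorem checkLists_spec : Claim_equal_checkLists := by
  intro int1 int2 _
  unfold Spec_checkLists
  exact checkLists_eq int1 int2
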